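-- pv_equiv track=rewrite | github.com/KevinMichaelCamp/Python-HardWay | Algorithms/Chapter3_ Arrays/23_Zip_It.py | zipIt
-- ===== SOURCE A (Python) =====
-- def zipIt(arr1, arr2):
--     new_array = []
--
--     if len(arr1) >= len(arr2):
--         longLen, shortLen = len(arr1), len(arr2)
--         longArr = arr1
--     else:
--         longLen, shortLen = len(arr2), len(arr1)
--         longArr = arr2
--
--     for i in range(shortLen):
--         new_array.append(arr1[i])
--         new_array.append(arr2[i])
--
--     for j in range(shortLen, longLen):
--         new_array.append(longArr[j])
--
--     return new_array
-- ===== SOURCE B (Python) =====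
-- def zipIt(arr1, arr2):
--     new_array = []
--     for i in range(max(len(arr1), len(arr2))):
--         if i < len(arr1):
--             new_array.append(arr1[i])
--         if i < len(arr2):
--             new_array.append(arr2[i])
--     return new_array
-- ===== Notes on version B (the rewrite author's own statement) =====
-- stated objective: simpler
-- what changed: Replaces A's longer-array selection plus two separate loops (interleave, then tail) by one loop to max(len1,len2) with two independent bounds-checked appends.
import Mathlib
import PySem

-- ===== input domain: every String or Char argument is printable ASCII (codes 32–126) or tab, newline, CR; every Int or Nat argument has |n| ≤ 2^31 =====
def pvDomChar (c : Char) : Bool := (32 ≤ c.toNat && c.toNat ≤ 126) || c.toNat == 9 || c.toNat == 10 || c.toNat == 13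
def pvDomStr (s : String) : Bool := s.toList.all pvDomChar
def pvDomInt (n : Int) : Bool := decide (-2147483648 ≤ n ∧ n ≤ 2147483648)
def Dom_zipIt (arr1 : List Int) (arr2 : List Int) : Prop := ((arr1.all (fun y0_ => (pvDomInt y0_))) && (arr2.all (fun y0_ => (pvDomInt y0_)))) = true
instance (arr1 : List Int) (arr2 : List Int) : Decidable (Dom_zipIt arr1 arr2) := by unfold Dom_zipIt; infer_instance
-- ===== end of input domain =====

-- ===== PORT A =====
-- B replaces A's longer-array selection and two loops by one loop with two bounds checks (objective: simpler).
def zipIt (arr1 : List Int) (arr2 : List Int) : List Int :=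
  let sel : Int × Int × List Int :=
    if (arr1.length : Int) ≥ (arr2.length : Int) then
      ((arr1.length : Int), (arr2.length : Int), arr1)
    else
      ((arr2.length : Int), (arr1.length : Int), arr2)
  let longLen := sel.1
  let shortLen := sel.2.1
  let longArr := sel.2.2
  let firstLoop :=
    (PySem.List.pyRange 0 shortLen 1).foldl
      (fun acc i => acc ++ [PySem.List.pyGetD arr1 i 0] ++ [PySem.List.pyGetD arr2 i 0]) []
  (PySem.List.pyRange shortLen longLen 1).foldl
    (fun acc j => acc ++ [PySem.List.pyGetD longArr j 0]) firstLoop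

-- ===== PORT B =====
def zipIt_alt (arr1 : List Int) (arr2 : List Int) : List Int :=
  (PySem.List.pyRange 0 (max (arr1.length : Int) (arr2.length : Int)) 1).foldl
    (fun acc i =>
      let acc1 := if i < (arr1.length : Int) then acc ++ [PySem.List.pyGetD arr1 i 0] else acc
      if i < (arr2.length : Int) then acc1 ++ [PySem.List.pyGetD arr2 i 0] else acc1) []

-- ===== PRECONDITION & SPEC =====
def Spec_zipIt (arr1 : List Int) (arr2 : List Int) (out : List Int) : Prop := out = zipIt_alt arr1 arr2
instance (arr1 : List Int) (arr2 : List Int) (out : List Int) : Decidable (Spec_zipIt arr1 arr2 out) := by unfold Spec_zipIt; infer_instance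

-- ===== CLAIM (what is proved, stated in full; the proofs are below) =====
def Claim_equal_zipIt : Prop := ∀ (arr1 : List Int) (arr2 : List Int), Dom_zipIt arr1 arr2 → Spec_zipIt arr1 arr2 (zipIt arr1 arr2)

-- ===== LEMMAS AND PROOFS =====

-- ===== VERDICT (by name: the statement is the Claim_ definition above) =====
theorem zipIt_eq (arr1 arr2 : List Int) : zipIt arr1 arr2 = zipIt_alt arr1 arr2 := by
  unfold zipIt zipIt_alt
  by_cases h : (arr1.length : Int) ≥ (arr2.length : Int)
  · simp only [h, if_pos]
    rw [max_eq_left h,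
        PySem.List.pyRange_one_append 0 (arr2.length : Int) (arr1.length : Int)
          (Int.natCast_nonneg _) h,
        List.foldl_append]
    have e1 : ∀ init : List Int,
        (PySem.List.pyRange 0 (arr2.length : Int) 1).foldl
          (fun acc i =>
            let acc1 := if i < (arr1.length : Int) then acc ++ [PySem.List.pyGetD arr1 i 0] else acc
            if i < (arr2.length : Int) then acc1 ++ [PySem.List.pyGetD arr2 i 0] else acc1) init
        = (PySem.List.pyRange 0 (arr2.length : Int) 1).foldl
          (fun acc i => acc ++ [PySem.List.pyGetD arr1 i 0] ++ [PySem.List.pyGetD arr2 i 0]) init := by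
      intro init
      apply PySem.List.foldl_congr_mem
      intro acc x hx
      rcases (PySem.List.mem_pyRange_one).1 hx with ⟨h1, h2⟩
      have hx1 : x < (arr1.length : Int) := lt_of_lt_of_le h2 h
      simp [hx1, h2]
    have e2 : ∀ init : List Int,
        (PySem.List.pyRange (arr2.length : Int) (arr1.length : Int) 1).foldl
          (fun acc i =>
            let acc1 := if i < (arr1.length : Int) then acc ++ [PySem.List.pyGetD arr1 i 0] else acc
            if i < (arr2.length : Int) then acc1 ++ [PySem.List.pyGetD arr2 i 0] else acc1) init
        = (PySem.List.pyRange (arr2.length : Int) (arr1.length : Int) 1).foldl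
          (fun acc j => acc ++ [PySem.List.pyGetD arr1 j 0]) init := by
      intro init
      apply PySem.List.foldl_congr_mem
      intro acc x hx
      rcases (PySem.List.mem_pyRange_one).1 hx with ⟨h1, h2⟩
      have hx2 : ¬ x < (arr2.length : Int) := not_lt.2 h1
      simp [h2, hx2]
    rw [e1, e2]
  · simp only [h, if_neg, not_false_iff]
    have h' : (arr1.length : Int) ≤ (arr2.length : Int) := le_of_not_ge h
    rw [max_eq_right h',
        PySem.List.pyRange_one_append 0 (arr1.length : Int) (arr2.length : Int)
          (Int.natCast_nonneg _) h',
        List.foldl_append]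
    have e1 : ∀ init : List Int,
        (PySem.List.pyRange 0 (arr1.length : Int) 1).foldl
          (fun acc i =>
            let acc1 := if i < (arr1.length : Int) then acc ++ [PySem.List.pyGetD arr1 i 0] else acc
            if i < (arr2.length : Int) then acc1 ++ [PySem.List.pyGetD arr2 i 0] else acc1) init
        = (PySem.List.pyRange 0 (arr1.length : Int) 1).foldl
          (fun acc i => acc ++ [PySem.List.pyGetD arr1 i 0] ++ [PySem.List.pyGetD arr2 i 0]) init := by
      intro init
      apply PySem.List.foldl_congr_mem
      intro acc x hx
      rcases (PySem.List.mem_pyRange_one).1 hx with ⟨h1, h2⟩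
      have hx2 : x < (arr2.length : Int) := lt_of_lt_of_le h2 h'
      simp [hx2, h2]
    have e2 : ∀ init : List Int,
        (PySem.List.pyRange (arr1.length : Int) (arr2.length : Int) 1).foldl
          (fun acc i =>
            let acc1 := if i < (arr1.length : Int) then acc ++ [PySem.List.pyGetD arr1 i 0] else acc
            if i < (arr2.length : Int) then acc1 ++ [PySem.List.pyGetD arr2 i 0] else acc1) init
        = (PySem.List.pyRange (arr1.length : Int) (arr2.length : Int) 1).foldl
          (fun acc j => acc ++ [PySem.List.pyGetD arr2 j 0]) init := by
      intro init
      apply PySem.List.foldl_congr_mem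
      intro acc x hx
      rcases (PySem.List.mem_pyRange_one).1 hx with ⟨h1, h2⟩
      have hx1 : ¬ x < (arr1.length : Int) := not_lt.2 h1
      simp [h2, hx1]
    rw [e1, e2]

-- ===== VERDICT (by name: the statement is the Claim_ definition above) =====
theorem zipIt_spec : Claim_equal_zipIt := by
  intro arr1 arr2 _
  unfold Spec_zipIt
  exact zipIt_eq arr1 arr2
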